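-- pv_equiv track=rewrite | github.com/KashyapTan/Xpdite | source/services/filesystem/file_browser.py | _subsequence_distance
-- ===== SOURCE A (Python) =====
-- def _subsequence_distance(needle: str, haystack: str) -> int | None:
--     if not needle:
--         return 0
--
--     i = 0
--     first = -1
--     last = -1
--     for index, char in enumerate(haystack):
--         if i < len(needle) and char == needle[i]:
--             if first == -1:
--                 first = index
--             last = index
--             i += 1
--             if i == len(needle):
--                 break
--
--     if i != len(needle):
--         return None
--
--     return max(0, (last - first + 1) - len(needle))
-- ===== SOURCE B (Python) =====
-- def _subsequence_distance(needle: str, haystack: str) -> int | None: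
--     if not needle:
--         return 0
--     pos = -1
--     first = -1
--     for ch in needle:
--         pos = haystack.find(ch, pos + 1)
--         if pos == -1:
--             return None
--         if first == -1:
--             first = pos
--     return max(0, (pos - first + 1) - len(needle))
-- ===== Notes on version B (the rewrite author's own statement) =====
-- stated objective: simpler
-- what changed: B iterates over the needle's characters, advancing with haystack.find(ch, pos+1), instead of A's indexed Python-level loop over every haystack character with a manual match counter.
import Mathlib
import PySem

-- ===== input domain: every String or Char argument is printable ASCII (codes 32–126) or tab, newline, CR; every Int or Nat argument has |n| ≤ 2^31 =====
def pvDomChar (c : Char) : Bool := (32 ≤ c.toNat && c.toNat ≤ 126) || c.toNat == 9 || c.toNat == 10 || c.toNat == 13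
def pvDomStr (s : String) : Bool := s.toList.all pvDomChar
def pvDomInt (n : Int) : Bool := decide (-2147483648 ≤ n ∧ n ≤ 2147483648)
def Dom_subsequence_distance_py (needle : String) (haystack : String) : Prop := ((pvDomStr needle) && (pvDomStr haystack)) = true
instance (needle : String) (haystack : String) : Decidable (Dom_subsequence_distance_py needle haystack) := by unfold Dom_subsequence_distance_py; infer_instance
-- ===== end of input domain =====

-- B loops over the needle's characters with haystack.find(ch, pos+1) instead of A's indexed scan over every haystack character with a manual match counter: simpler/shorter, same return value.

-- ===== PORT A =====
-- the 'for index, char in enumerate(haystack)' loop; state (i, first, last); break = early return of the state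
def subseqALoop (needle : List Char) : List Char → Int → Nat → Int → Int → (Nat × Int × Int)
  | [], _, i, first, last => (i, first, last)
  | ch :: rest, index, i, first, last =>
    if i < needle.length ∧ needle[i]? = some ch then
      let first' := if first = -1 then index else first
      let last' := index
      let i' := i + 1
      if i' = needle.length then (i', first', last')
      else subseqALoop needle rest (index + 1) i' first' last'
    else subseqALoop needle rest (index + 1) i first last

def subsequence_distance_py (needle : String) (haystack : String) : Option Int :=
  if needle.toList = [] then some 0
  else
    let st := subseqALoop needle.toList haystack.toList 0 0 (-1) (-1)
    if st.1 ≠ needle.toList.length then none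
    else some (max 0 ((st.2.2 - st.2.1 + 1) - (needle.toList.length : Int)))


-- ===== PORT B =====
-- the 'for ch in needle' loop of Source B; pos = haystack.find(ch, pos + 1); early 'return None' on -1
def subseqBLoop (haystack : List Char) : List Char → Int → Int → Option (Int × Int)
  | [], pos, first => some (pos, first)
  | ch :: rest, pos, first =>
    let pos' := PySem.Chars.findFrom haystack [ch] (pos + 1) none
    if pos' = -1 then none
    else
      let first' := if first = -1 then pos' else first
      subseqBLoop haystack rest pos' first'

def subsequence_distance_py_alt (needle : String) (haystack : String) : Option Int :=
  if needle.toList = [] then some 0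
  else
    match subseqBLoop haystack.toList needle.toList (-1) (-1) with
    | none => none
    | some (pos, first) => some (max 0 ((pos - first + 1) - (needle.toList.length : Int)))


-- ===== PRECONDITION & SPEC =====
def Spec_subsequence_distance_py (needle : String) (haystack : String) (out : Option Int) : Prop := out = subsequence_distance_py_alt needle haystack
instance (needle : String) (haystack : String) (out : Option Int) : Decidable (Spec_subsequence_distance_py needle haystack out) := by unfold Spec_subsequence_distance_py; infer_instance

-- ===== CLAIM (what is proved, stated in full; the proofs are below) =====
def Claim_equal_subsequence_distance_py : Prop := ∀ (needle : String) (haystack : String), Dom_subsequence_distance_py needle haystack → Spec_subsequence_distance_py needle haystack (subsequence_distance_py needle haystack)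

-- ===== LEMMAS AND PROOFS =====

lemma single_prefix (t : List Char) (c : Char) : [c] <+: t ↔ t.head? = some c := by
  cases t with
  | nil => simp
  | cons a u => simp [List.cons_prefix_cons, eq_comm]

lemma single_prefix_drop (l : List Char) (i : Nat) (c : Char) :
    [c] <+: l.drop i ↔ l[i]? = some c := by
  rw [single_prefix, List.head?_drop]

lemma find_one_nil (c : Char) : PySem.Chars.find [] [c] = -1 := by
  rw [PySem.Chars.find_eq_neg_one_iff, List.singleton_infix_iff]; simp

lemma find_one_hit (t : List Char) (c : Char) : PySem.Chars.find (c :: t) [c] = 0 := by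
  have h0 : 0 ≤ PySem.Chars.find (c :: t) [c] := by
    rw [PySem.Chars.find_nonneg_iff, List.singleton_infix_iff]; simp
  obtain ⟨hpre, hmin⟩ := PySem.Chars.find_spec h0
  by_contra hne
  have : (PySem.Chars.find (c :: t) [c]).toNat ≠ 0 := by omega
  have := hmin 0 (by omega)
  simp at this

lemma find_one_miss (a : Char) (t : List Char) (c : Char) (h : a ≠ c) :
    PySem.Chars.find (a :: t) [c] =
      (if PySem.Chars.find t [c] = -1 then -1 else 1 + PySem.Chars.find t [c]) := by
  by_cases hc : c ∈ t
  · have h1 : 0 ≤ PySem.Chars.find (a :: t) [c] := by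
      rw [PySem.Chars.find_nonneg_iff, List.singleton_infix_iff]; simp [hc]
    have h2 : 0 ≤ PySem.Chars.find t [c] := by
      rw [PySem.Chars.find_nonneg_iff, List.singleton_infix_iff]; exact hc
    obtain ⟨hpre1, hmin1⟩ := PySem.Chars.find_spec h1
    obtain ⟨hpre2, hmin2⟩ := PySem.Chars.find_spec h2
    set n := (PySem.Chars.find (a :: t) [c]).toNat with hn
    set m := (PySem.Chars.find t [c]).toNat with hm
    have hnpos : n ≠ 0 := by
      intro h0
      rw [h0] at hpre1
      rw [single_prefix_drop] at hpre1
      simp at hpre1; exact h hpre1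
    -- (a::t).drop n = t.drop (n-1)
    have hd : ∀ j : Nat, (a :: t).drop (j+1) = t.drop j := by intro j; simp
    have hpre1' : [c] <+: t.drop (n-1) := by
      have := hpre1; rwa [show n = (n-1)+1 by omega, hd] at this
    have hmn : m ≤ n - 1 := by
      by_contra hlt
      exact hmin2 (n-1) (by omega) hpre1'
    have hnm : n ≤ m + 1 := by
      by_contra hlt
      exact hmin1 (m+1) (by omega) (by rw [hd]; exact hpre2)
    have : n = m + 1 := by omega
    rw [if_neg (by omega)]
    omega
  · have h1 : PySem.Chars.find (a :: t) [c] = -1 := by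
      rw [PySem.Chars.find_eq_neg_one_iff, List.singleton_infix_iff]
      simp [hc]; exact fun e => h e.symm
    have h2 : PySem.Chars.find t [c] = -1 := by
      rw [PySem.Chars.find_eq_neg_one_iff, List.singleton_infix_iff]; exact hc
    rw [h1, h2]; simp

lemma findFrom_one_end (s : List Char) (c : Char) :
    PySem.Chars.findFrom s [c] (s.length : Int) = -1 := by
  rw [PySem.Chars.findFrom_natCast s [c] s.length le_rfl]
  simp [find_one_nil]

lemma findFrom_one_hit (s : List Char) (c : Char) (k : Nat) (hk : k < s.length)
    (h : s[k] = c) :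
    PySem.Chars.findFrom s [c] (k : Int) = (k : Int) := by
  rw [PySem.Chars.findFrom_natCast s [c] k (by omega)]
  rw [List.drop_eq_getElem_cons hk, h, find_one_hit]
  simp

lemma findFrom_one_miss (s : List Char) (c : Char) (k : Nat) (hk : k < s.length)
    (h : s[k] ≠ c) :
    PySem.Chars.findFrom s [c] (k : Int) = PySem.Chars.findFrom s [c] ((k : Int) + 1) := by
  rw [PySem.Chars.findFrom_natCast s [c] k (by omega)]
  rw [show ((k : Int) + 1) = ((k+1 : Nat) : Int) by push_cast; ring]
  rw [PySem.Chars.findFrom_natCast s [c] (k+1) (by omega)]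
  rw [List.drop_eq_getElem_cons hk, find_one_miss s[k] _ c h]
  have hb := PySem.Chars.neg_one_le_find (s.drop (k+1)) [c]
  split_ifs with h1 h2 h3 <;> omega

-- simulation invariant: A's remaining scan of the haystack from position k, having matched i needle
-- characters, equals B's remaining needle loop started with pos = k - 1
lemma sim (s ndl : List Char) :
    ∀ (hs rest : List Char) (k i : Nat) (first last : Int),
      hs = s.drop k → k ≤ s.length → rest ≠ [] →
      i + rest.length = ndl.length → rest = ndl.drop i →
      (let st := subseqALoop ndl hs (k : Int) i first last
       if st.1 = ndl.length then some (st.2.1, st.2.2) else none)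
        = (subseqBLoop s rest ((k : Int) - 1) first).map (fun p => (p.2, p.1)) := by
  intro hs
  induction hs with
  | nil =>
    intro rest k i first last hdrop hk hne hlen hrest
    have hkl : k = s.length := by
      have := List.drop_eq_nil_iff.mp hdrop.symm
      omega
    obtain ⟨c, r, rfl⟩ := List.exists_cons_of_ne_nil hne
    have hfind : PySem.Chars.findFrom s [c] ((k : Int) - 1 + 1) = -1 := by
      rw [show (k:Int) - 1 + 1 = (k:Int) by ring, hkl]
      exact findFrom_one_end s c
    have hine : i ≠ ndl.length := by simp at hlen; omega
    simp only [subseqALoop, subseqBLoop, hfind]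
    simp [hine]
  | cons a hs' ih =>
    intro rest k i first last hdrop hk hne hlen hrest
    have hklt : k < s.length := by
      by_contra h
      rw [List.drop_eq_nil_iff.mpr (by omega)] at hdrop
      exact absurd hdrop (by simp)
    have hd := List.drop_eq_getElem_cons hklt
    rw [← hdrop] at hd
    injection hd with ha hhs'
    obtain ⟨c, r, rfl⟩ := List.exists_cons_of_ne_nil hne
    have hilt : i < ndl.length := by simp at hlen; omega
    have hni : ndl[i]? = some c := by
      have : (ndl.drop i).head? = some c := by rw [← hrest]; simp
      rwa [List.head?_drop] at this
    have hstep : ((k : Int) - 1) + 1 = (k : Int) := by ring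
    by_cases hac : a = c
    · -- match
      subst hac
      have hcond : i < ndl.length ∧ ndl[i]? = some a := ⟨hilt, hni⟩
      have hfind : PySem.Chars.findFrom s [a] ((k : Int) - 1 + 1) = (k : Int) := by
        rw [hstep]; exact findFrom_one_hit s a k hklt (by rw [← ha])
      by_cases hend : i + 1 = ndl.length
      · -- break: r = []
        have hr : r = [] := by
          simp at hlen
          exact List.eq_nil_of_length_eq_zero (by omega)
        subst hr
        simp only [subseqALoop, subseqBLoop, hcond, hfind, hend]
        simp [show ¬ ((k:Int) = -1) by omega]
      · have hr : r ≠ [] := by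
          intro h; subst h; simp at hlen; omega
        simp only [subseqALoop, subseqBLoop, hcond, hfind, hend]
        rw [if_neg (show ¬ ((k:Int) = -1) by omega)]
        have := ih r (k+1) (i+1) (if first = -1 then (k:Int) else first) (k:Int)
          (by rw [hhs']) (by omega) hr (by simp at hlen ⊢; omega)
          (by rw [← List.tail_drop]; rw [← hrest]; simp)
        rw [show ((k:Int) + 1) = ((k+1 : Nat) : Int) by push_cast; ring] at *
        rw [show (((k+1 : Nat) : Int) - 1) = (k : Int) by push_cast; ring] at this
        exact this
    · -- no match
      have hcond : ¬ (i < ndl.length ∧ ndl[i]? = some a) := by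
        intro ⟨_, h2⟩
        rw [hni] at h2
        exact hac (Option.some.inj h2).symm
      have hfind : PySem.Chars.findFrom s [c] ((k : Int) - 1 + 1)
          = PySem.Chars.findFrom s [c] ((k : Int) + 1 - 1 + 1) := by
        rw [hstep, show (k:Int) + 1 - 1 + 1 = (k:Int) + 1 by ring]
        exact findFrom_one_miss s c k hklt (by rw [← ha]; exact fun h => hac h)
      have := ih (c :: r) (k+1) i first last
        (by rw [hhs']) (by omega) (by simp) (by simpa using hlen) hrest
      simp only [subseqALoop, hcond, if_false]
      rw [show ((k:Int) + 1) = ((k+1 : Nat) : Int) by push_cast; ring]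
      rw [this]
      simp only [subseqBLoop]
      rw [show (((k+1 : Nat) : Int) - 1 + 1) = (k:Int) + 1 - 1 + 1 by push_cast; ring, ← hfind]

-- ===== VERDICT (by name: the statement is the Claim_ definition above) =====
theorem subsequence_distance_py_spec : Claim_equal_subsequence_distance_py := by
  intro needle haystack _
  unfold Spec_subsequence_distance_py
  show subsequence_distance_py needle haystack = subsequence_distance_py_alt needle haystack
  unfold subsequence_distance_py subsequence_distance_py_alt
  by_cases h : needle.toList = []
  · simp [h]
  · rw [if_neg h, if_neg h]
    have hsim := sim haystack.toList needle.toList haystack.toList needle.toList 0 0 (-1) (-1)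
      (by simp) (by omega) h (by simp) (by simp)
    simp only [Nat.cast_zero, zero_sub] at hsim
    cases hB : subseqBLoop haystack.toList needle.toList (-1) (-1) with
    | none =>
      rw [hB] at hsim
      simp only [Option.map_none] at hsim
      split_ifs at hsim with hA
      all_goals simp_all
    | some p =>
      obtain ⟨pos, f⟩ := p
      rw [hB] at hsim
      simp only [Option.map_some] at hsim
      split_ifs at hsim with hA
      all_goals simp_all [Prod.ext_iff]
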